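-- pv_equiv track=rewrite | github.com/PsychoLeo/informatique | competitions/prologin/training/vacances_spatiales.py | vacances_spatiales
-- ===== SOURCE A (Python) =====
-- def vacances_spatiales(p, d, mn, calendar):
--     """
--     :param p: le nombre de jours durant lesquels Chewbacca peut partir
--     :type p: int
--     :param d: le nombre de jours total minimun que Chewie veut passer avec sa famille
--     :type d: int
--     :param mn: le minimum de jours consécutifs pour un voyage
--     :type mn: int
--     :param calendar: les jours de la période donnée
--     :type calendar: list[int]
--     retourne 0 s'il ne peut partir en vacances assez et 1 s'il peut
--     """
--     if p < d or calendar.count(0) < d: # if impossible to leave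
--         return 0
--     numDays = len(calendar)
--     possible = 0
--     i = 0
--     while i < numDays :
--         successifs = 0
--         while i < numDays and calendar[i] == 0 :
--             i += 1
--             successifs += 1
--             if successifs >= mn :
--                 while i < numDays and calendar[i] == 0 :
--                     successifs += 1
--                     i += 1
--                 possible += successifs
--         i += 1
--     return int(possible>=d)
-- ===== SOURCE B (Python) =====
-- def vacances_spatiales(p, d, mn, calendar):
--     # group calendar into maximal runs of equal values, then sum long zero-runs
--     if p < d:
--         return 0
--     runs = []
--     for x in calendar:
--         if runs and runs[-1][0] == x:
--             runs[-1][1] += 1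
--         else:
--             runs.append([x, 1])
--     total = sum(c for k, c in runs if k == 0 and c >= mn)
--     return int(total >= d)
-- ===== Notes on version B (the rewrite author's own statement) =====
-- stated objective: simpler
-- what changed: Replaces A's hand-advanced index with three nested while loops by a group-then-reduce pass: build the list of maximal runs of equal values in one loop, then sum the zero-runs of length >= mn; also drops A's redundant calendar.count(0) pre-scan (the run total never exceeds the zero count, proved as refT_le_count).
import Mathlib
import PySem

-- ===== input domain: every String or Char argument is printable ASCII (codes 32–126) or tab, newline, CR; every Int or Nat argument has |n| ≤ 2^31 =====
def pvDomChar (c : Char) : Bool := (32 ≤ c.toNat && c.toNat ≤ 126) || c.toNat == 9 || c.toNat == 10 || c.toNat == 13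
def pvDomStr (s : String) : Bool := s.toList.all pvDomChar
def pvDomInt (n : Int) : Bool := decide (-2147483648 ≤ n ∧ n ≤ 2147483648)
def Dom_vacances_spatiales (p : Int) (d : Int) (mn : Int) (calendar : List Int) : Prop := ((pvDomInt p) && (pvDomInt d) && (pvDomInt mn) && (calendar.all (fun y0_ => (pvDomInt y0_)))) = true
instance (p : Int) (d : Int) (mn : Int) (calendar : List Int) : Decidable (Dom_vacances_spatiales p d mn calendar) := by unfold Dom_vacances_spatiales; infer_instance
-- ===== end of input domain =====

-- B replaces A's hand-advanced nested-while index walk by a group-then-reduce pass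
-- (split the calendar into maximal runs of equal values, sum the zero-runs of length ≥ mn);
-- B also drops A's redundant `calendar.count(0) < d` shortcut (the run total never exceeds the zero count).

-- ===== PORT A =====
-- innermost `while i < numDays and calendar[i] == 0: successifs += 1; i += 1`
def pyA3 (cal : List Int) (n : Int) : Nat → Int → Int → Int × Int
  | 0, i, succ => (i, succ)
  | fuel+1, i, succ =>
    if i < n ∧ PySem.List.pyGet? cal i = some 0 then
      pyA3 cal n fuel (i + 1) (succ + 1)
    else (i, succ)

-- middle `while i < numDays and calendar[i] == 0 : …`
def pyA2 (cal : List Int) (n : Int) (mn : Int) : Nat → Int → Int → Int → Int × Int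
  | 0, i, _succ, poss => (i, poss)
  | fuel+1, i, succ, poss =>
    if i < n ∧ PySem.List.pyGet? cal i = some 0 then
      let i' := i + 1
      let s' := succ + 1
      if mn ≤ s' then
        let r := pyA3 cal n cal.length i' s'
        pyA2 cal n mn fuel r.1 r.2 (poss + r.2)
      else
        pyA2 cal n mn fuel i' s' poss
    else (i, poss)

-- outer `while i < numDays : successifs = 0; …; i += 1`
def pyA1 (cal : List Int) (n : Int) (mn : Int) : Nat → Int → Int → Int
  | 0, _i, poss => poss
  | fuel+1, i, poss =>
    if i < n then
      let r := pyA2 cal n mn (cal.length + 1) i 0 poss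
      pyA1 cal n mn fuel (r.1 + 1) r.2
    else poss

def vacances_spatiales (p : Int) (d : Int) (mn : Int) (calendar : List Int) : Int :=
  if p < d ∨ (PySem.List.count calendar 0 : Int) < d then 0
  else
    let numDays : Int := calendar.length
    let possible := pyA1 calendar numDays mn (calendar.length + 1) 0 0
    if d ≤ possible then 1 else 0

-- ===== PORT B =====
-- one step of the run-building loop: merge x into the last run or open a new one
def runStep (runs : List (Int × Int)) (x : Int) : List (Int × Int) :=
  match runs.getLast? with
  | some (k, c) => if k = x then runs.dropLast ++ [(k, c + 1)] else runs ++ [(x, 1)]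
  | none => [(x, 1)]

-- `sum(c for k, c in runs if k == 0 and c >= mn)`
def sumLongZero (mn : Int) : List (Int × Int) → Int
  | [] => 0
  | (k, c) :: rest => (if k = 0 ∧ mn ≤ c then c else 0) + sumLongZero mn rest

def vacances_spatiales_alt (p : Int) (d : Int) (mn : Int) (calendar : List Int) : Int :=
  if p < d then 0
  else
    let runs := calendar.foldl runStep []
    let total := sumLongZero mn runs
    if d ≤ total then 1 else 0

-- ===== PRECONDITION & SPEC =====
def Spec_vacances_spatiales (p : Int) (d : Int) (mn : Int) (calendar : List Int) (out : Int) : Prop := out = vacances_spatiales_alt p d mn calendar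
instance (p : Int) (d : Int) (mn : Int) (calendar : List Int) (out : Int) : Decidable (Spec_vacances_spatiales p d mn calendar out) := by unfold Spec_vacances_spatiales; infer_instance

-- ===== CLAIM (what is proved, stated in full; the proofs are below) =====
def Claim_equal_vacances_spatiales : Prop := ∀ (p : Int) (d : Int) (mn : Int) (calendar : List Int), Dom_vacances_spatiales p d mn calendar → Spec_vacances_spatiales p d mn calendar (vacances_spatiales p d mn calendar)

-- ===== LEMMAS AND PROOFS =====

-- number of leading elements equal to k
def leadEq (k : Int) : List Int → Nat
  | [] => 0
  | x :: xs => if x = k then leadEq k xs + 1 else 0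

-- common reference value: sum of the maximal zero-runs of length ≥ mn
def refT (mn : Int) : List Int → Int
  | [] => 0
  | x :: xs =>
    let L := leadEq 0 (x :: xs)
    (if 1 ≤ L ∧ mn ≤ (L : Int) then (L : Int) else 0) + refT mn ((x :: xs).drop (L + 1))
termination_by l => l.length
decreasing_by simp

theorem leadEq_drop_head (k : Int) :
    ∀ (l : List Int) (y : Int) (ys : List Int), l.drop (leadEq k l) = y :: ys → y ≠ k := by
  intro l
  induction l with
  | nil => intro y ys h; simp [leadEq] at h
  | cons x xs ih =>
    intro y ys h
    by_cases hx : x = k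
    · simp [leadEq, hx] at h; exact ih y ys h
    · simp [leadEq, hx] at h
      intro hy; exact hx (h.1 ▸ hy)

-- B side: runStep never empties the run list
theorem runStep_ne_nil (rs : List (Int × Int)) (x : Int) : runStep rs x ≠ [] := by
  unfold runStep
  cases h : rs.getLast? with
  | none => simp
  | some kc =>
    obtain ⟨k, c⟩ := kc
    by_cases hk : k = x <;> simp [hk]

-- a nonempty tail of the accumulator is processed independently of the prefix
theorem runStep_append (pre rs : List (Int × Int)) (x : Int) (h : rs ≠ []) :
    runStep (pre ++ rs) x = pre ++ runStep rs x := by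
  unfold runStep
  rw [List.getLast?_append]
  cases hg : rs.getLast? with
  | none => simp [List.getLast?_eq_none_iff] at hg; exact absurd hg h
  | some kc =>
    obtain ⟨k, c⟩ := kc
    by_cases hk : k = x <;>
      simp [hk, h, List.append_assoc]

theorem foldl_runStep_append (t : List Int) :
    ∀ (pre rs : List (Int × Int)), rs ≠ [] →
      List.foldl runStep (pre ++ rs) t = pre ++ List.foldl runStep rs t := by
  induction t with
  | nil => intro pre rs _; rfl
  | cons x t ih =>
    intro pre rs h
    simp only [List.foldl_cons]
    rw [runStep_append pre rs x h, ih pre (runStep rs x) (runStep_ne_nil rs x)]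

-- a singleton accumulator absorbs the leading run of its own key
theorem foldl_runStep_single (t : List Int) :
    ∀ (k c : Int),
      List.foldl runStep [(k, c)] t =
        (k, c + (leadEq k t : Int)) :: List.foldl runStep [] (t.drop (leadEq k t)) := by
  induction t with
  | nil => intro k c; simp [leadEq]
  | cons x t ih =>
    intro k c
    by_cases hx : x = k
    · subst hx
      have hstep : runStep [(x, c)] x = [(x, c + 1)] := by simp [runStep]
      have hL : leadEq x (x :: t) = leadEq x t + 1 := by simp [leadEq]
      rw [List.foldl_cons, hstep, ih x (c + 1), hL, List.drop_succ_cons]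
      have hc : c + 1 + (leadEq x t : Int) = c + ((leadEq x t + 1 : Nat) : Int) := by
        push_cast; ring
      rw [hc]
    · have hstep : runStep [(k, c)] x = [(k, c), (x, 1)] := by
        simp [runStep, Ne.symm hx]
      have h0 : leadEq k (x :: t) = 0 := by simp [leadEq, hx]
      simp only [List.foldl_cons, hstep, h0, List.drop_zero]
      have he : ([(k, c), (x, 1)] : List (Int × Int)) = [(k, c)] ++ [(x, 1)] := rfl
      rw [he, foldl_runStep_append t [(k, c)] [(x, 1)] (by simp)]
      simp only [Nat.cast_zero, Int.add_zero]
      rfl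

-- a leading nonzero run contributes nothing to the sum
theorem sumLongZero_foldl_nonzero (mn : Int) (t : List Int) :
    ∀ (y c : Int), y ≠ 0 →
      sumLongZero mn (List.foldl runStep [(y, c)] t) =
        sumLongZero mn (List.foldl runStep [] t) := by
  induction t with
  | nil => intro y c hy; simp [sumLongZero, hy]
  | cons x t ih =>
    intro y c hy
    by_cases hx : x = y
    · have hstep : runStep [(y, c)] x = [(y, c + 1)] := by simp [runStep, hx]
      have hstep0 : List.foldl runStep [] (x :: t) = List.foldl runStep [(x, 1)] t := rfl
      simp only [List.foldl_cons, hstep, hstep0]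
      rw [ih y (c + 1) hy, hx, ih y 1 hy]
    · have hstep : runStep [(y, c)] x = [(y, c)] ++ [(x, 1)] := by
        simp [runStep, Ne.symm hx]
      have hstep0 : List.foldl runStep [] (x :: t) = List.foldl runStep [(x, 1)] t := rfl
      simp only [List.foldl_cons, hstep, hstep0]
      rw [foldl_runStep_append t [(y, c)] [(x, 1)] (by simp)]
      simp [sumLongZero, hy]

-- main B lemma: the group-then-reduce pass computes refT
theorem sumLongZero_eq_refT (mn : Int) :
    ∀ (n : Nat) (l : List Int), l.length ≤ n →
      sumLongZero mn (List.foldl runStep [] l) = refT mn l := by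
  intro n
  induction n with
  | zero =>
    intro l hl
    have : l = [] := List.eq_nil_of_length_eq_zero (Nat.le_zero.mp hl)
    subst this; simp [sumLongZero, refT]
  | succ n ih =>
    intro l hl
    cases l with
    | nil => simp [sumLongZero, refT]
    | cons x xs =>
      have hfold : List.foldl runStep [] (x :: xs) = List.foldl runStep [(x, 1)] xs := rfl
      by_cases hx : x = 0
      · subst hx
        rw [hfold, foldl_runStep_single xs 0 1]
        have hL : leadEq 0 ((0 : Int) :: xs) = leadEq 0 xs + 1 := by simp [leadEq]
        rw [refT]
        simp only [hL]
        set L := leadEq 0 xs with hLdef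
        have hdrop : ((0 : Int) :: xs).drop (L + 1 + 1) = xs.drop (L + 1) := by
          simp [List.drop_succ_cons]
        rw [hdrop]
        have htail : sumLongZero mn (List.foldl runStep [] (xs.drop L)) = refT mn (xs.drop (L + 1)) := by
          cases hd : xs.drop L with
          | nil =>
            have h0 : xs.drop (L + 1) = [] := by
              have := congrArg (List.drop 1) hd
              rw [List.drop_drop] at this
              simpa [Nat.add_comm] using this
            simp [h0, sumLongZero, refT]
          | cons y ys =>
            have hy : y ≠ 0 := leadEq_drop_head 0 xs y ys hd
            have hys : xs.drop (L + 1) = ys := by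
              have := congrArg (List.drop 1) hd
              rw [List.drop_drop] at this
              simpa [Nat.add_comm] using this
            have hfold2 : List.foldl runStep [] (y :: ys) = List.foldl runStep [(y, 1)] ys := rfl
            rw [hfold2, sumLongZero_foldl_nonzero mn ys y 1 hy, hys]
            apply ih
            have h1 : (y :: ys).length = xs.length - L := by rw [← hd]; simp
            have h3 : xs.length ≤ n := by simpa using hl
            simp at h1
            omega
        rw [sumLongZero, htail]
        have hcast : ((L + 1 : Nat) : Int) = 1 + (L : Int) := by push_cast; ring
        rw [hcast]
        by_cases hc : mn ≤ 1 + (L : Int)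
        · rw [if_pos ⟨rfl, hc⟩, if_pos ⟨Nat.succ_le_succ (Nat.zero_le L), hc⟩]
        · rw [if_neg (fun h => hc h.2), if_neg (fun h => hc h.2)]
      · have hL0 : leadEq 0 (x :: xs) = 0 := by simp [leadEq, hx]
        rw [hfold, sumLongZero_foldl_nonzero mn xs x 1 hx, refT]
        simp only [hL0]
        rw [if_neg (by simp)]
        simp only [List.drop_succ_cons, List.drop_zero, Nat.zero_add, Int.zero_add]
        exact ih xs (by simpa using Nat.le_of_succ_le_succ hl)

-- A side: the loop condition `i < numDays and calendar[i] == 0` seen through drop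
theorem cond_iff (cal : List Int) (i : Nat) :
    ((i : Int) < (cal.length : Int) ∧ PySem.List.pyGet? cal (i : Int) = some 0) ↔
      (cal.drop i).head? = some 0 := by
  rw [PySem.List.pyGet?_natCast, ← List.head?_drop]
  constructor
  · exact And.right
  · intro h
    refine ⟨?_, h⟩
    have : i < cal.length := by
      by_contra hi
      rw [List.drop_eq_nil_of_le (by omega)] at h
      simp at h
    exact_mod_cast this

theorem leadEq_drop_self (k : Int) (l : List Int) : leadEq k (l.drop (leadEq k l)) = 0 := by
  cases hd : l.drop (leadEq k l) with
  | nil => simp [leadEq]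
  | cons y ys => simp [leadEq, leadEq_drop_head k l y ys hd]

theorem leadEq_zero_of_head_ne (l : List Int) (h : ¬ l.head? = some 0) : leadEq 0 l = 0 := by
  cases l with
  | nil => simp [leadEq]
  | cons y ys =>
    simp only [List.head?_cons] at h
    have hy : ¬ y = 0 := fun hy => h (by rw [hy])
    simp [leadEq, hy]

theorem drop_of_head_zero (l : List Int) (i : Nat) (h : (l.drop i).head? = some 0) :
    l.drop i = 0 :: l.drop (i + 1) ∧ leadEq 0 (l.drop i) = leadEq 0 (l.drop (i + 1)) + 1 := by
  cases hd : l.drop i with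
  | nil => rw [hd] at h; simp at h
  | cons y ys =>
    rw [hd] at h
    simp only [List.head?_cons, Option.some.injEq] at h
    subst h
    have hys : l.drop (i + 1) = ys := by
      have := congrArg (List.drop 1) hd
      rw [List.drop_drop] at this
      simpa [Nat.add_comm] using this
    constructor
    · rw [hys]
    · rw [hys]; simp [leadEq]

-- innermost loop: consumes the leading zero-run
theorem pyA3_eq (cal : List Int) :
    ∀ (m i : Nat) (succ : Int), cal.length ≤ m + i →
      pyA3 cal (cal.length : Int) m (i : Int) succ =
        (((i + leadEq 0 (cal.drop i) : Nat) : Int), succ + (leadEq 0 (cal.drop i) : Int)) := by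
  intro m
  induction m with
  | zero =>
    intro i succ hm
    have hd : cal.drop i = [] := List.drop_eq_nil_of_le (by omega)
    simp [pyA3, hd, leadEq]
  | succ m ih =>
    intro i succ hm
    rw [pyA3]
    by_cases h : (i : Int) < (cal.length : Int) ∧ PySem.List.pyGet? cal (i : Int) = some 0
    · rw [if_pos h]
      obtain ⟨-, hL⟩ := drop_of_head_zero cal i ((cond_iff cal i).mp h)
      have hcast : (i : Int) + 1 = ((i + 1 : Nat) : Int) := by push_cast; ring
      rw [hcast, ih (i + 1) (succ + 1) (by omega), hL]
      simp only [Prod.mk.injEq]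
      refine ⟨by omega, by omega⟩
    · rw [if_neg h]
      have hL : leadEq 0 (cal.drop i) = 0 :=
        leadEq_zero_of_head_ne _ (fun hh => h ((cond_iff cal i).mpr hh))
      simp [hL]

-- middle loop from an arbitrary running count s
theorem pyA2_eq (cal : List Int) (mn : Int) :
    ∀ (m i : Nat) (s poss : Int), cal.length + 1 ≤ m + i →
      pyA2 cal (cal.length : Int) mn m (i : Int) s poss =
        (((i + leadEq 0 (cal.drop i) : Nat) : Int),
          poss + (if 1 ≤ leadEq 0 (cal.drop i) ∧ mn ≤ s + (leadEq 0 (cal.drop i) : Int)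
                  then s + (leadEq 0 (cal.drop i) : Int) else 0)) := by
  intro m
  induction m with
  | zero =>
    intro i s poss hm
    have hd : cal.drop i = [] := List.drop_eq_nil_of_le (by omega)
    simp [pyA2, hd, leadEq]
  | succ m ih =>
    intro i s poss hm
    rw [pyA2]
    by_cases h : (i : Int) < (cal.length : Int) ∧ PySem.List.pyGet? cal (i : Int) = some 0
    · rw [if_pos h]
      obtain ⟨-, hL⟩ := drop_of_head_zero cal i ((cond_iff cal i).mp h)
      set L' := leadEq 0 (cal.drop (i + 1)) with hL'def
      have hcast : (i : Int) + 1 = ((i + 1 : Nat) : Int) := by push_cast; ring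
      by_cases hmn : mn ≤ s + 1
      · rw [if_pos hmn]
        rw [hcast, pyA3_eq cal cal.length (i + 1) (s + 1) (by omega)]
        simp only
        rw [← hL'def]
        rw [ih (i + 1 + L') (s + 1 + (L' : Int)) (poss + (s + 1 + (L' : Int))) (by omega)]
        have hzero : leadEq 0 (cal.drop (i + 1 + L')) = 0 := by
          have h0 := leadEq_drop_self 0 (cal.drop (i + 1))
          rw [List.drop_drop] at h0
          rw [hL'def]
          exact h0
        rw [hzero, hL]
        simp only [Prod.mk.injEq]
        refine ⟨by omega, by split_ifs <;> omega⟩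
      · rw [if_neg hmn]
        rw [hcast, ih (i + 1) (s + 1) poss (by omega)]
        rw [← hL'def, hL]
        simp only [Prod.mk.injEq]
        refine ⟨by omega, by split_ifs <;> omega⟩
    · rw [if_neg h]
      have hL : leadEq 0 (cal.drop i) = 0 :=
        leadEq_zero_of_head_ne _ (fun hh => h ((cond_iff cal i).mpr hh))
      simp [hL]

-- outer loop computes refT of the unprocessed suffix
theorem pyA1_eq (cal : List Int) (mn : Int) :
    ∀ (m i : Nat) (poss : Int), cal.length < m + i →
      pyA1 cal (cal.length : Int) mn m (i : Int) poss = poss + refT mn (cal.drop i) := by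
  intro m
  induction m with
  | zero =>
    intro i poss hm
    have hd : cal.drop i = [] := List.drop_eq_nil_of_le (by omega)
    simp [pyA1, hd, refT]
  | succ m ih =>
    intro i poss hm
    rw [pyA1]
    by_cases h : (i : Int) < (cal.length : Int)
    · rw [if_pos h]
      simp only
      rw [pyA2_eq cal mn (cal.length + 1) i 0 poss (by omega)]
      dsimp only
      set L := leadEq 0 (cal.drop i) with hLdef
      have hcast : ((i + L : Nat) : Int) + 1 = ((i + L + 1 : Nat) : Int) := by push_cast; ring
      rw [hcast, ih (i + L + 1) _ (by omega)]
      cases hd : cal.drop i with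
      | nil =>
        exfalso
        have : cal.length ≤ i := by
          by_contra hc
          have := List.drop_eq_nil_iff.mp hd
          omega
        omega
      | cons x t =>
        rw [refT]
        have hL2 : leadEq 0 (x :: t) = L := by rw [hLdef, hd]
        simp only [hL2]
        have hdrop2 : (x :: t).drop (L + 1) = cal.drop (i + L + 1) := by
          have hadd : i + (L + 1) = i + L + 1 := by omega
          rw [← hd, List.drop_drop, hadd]
        rw [hdrop2]
        have haddend : (if 1 ≤ L ∧ mn ≤ 0 + (L : Int) then 0 + (L : Int) else 0) =
            (if 1 ≤ L ∧ mn ≤ (L : Int) then (L : Int) else 0) := by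
          split_ifs <;> omega
        rw [haddend]
        ring
    · rw [if_neg h]
      have hd : cal.drop i = [] := List.drop_eq_nil_of_le (by omega)
      simp [hd, refT]

-- count decomposition along the leading zero-run
theorem count_drop_leadEq (l : List Int) :
    List.count 0 l = leadEq 0 l + List.count 0 (l.drop (leadEq 0 l)) := by
  induction l with
  | nil => simp [leadEq]
  | cons x xs ih =>
    by_cases hx : x = 0
    · subst hx
      simp only [leadEq, List.count_cons]
      simp only [ih]
      simp
      omega
    · simp [leadEq, hx]

-- the run total never exceeds the number of zeros (justifies dropping A's count shortcut)
theorem refT_le_count (mn : Int) :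
    ∀ (n : Nat) (l : List Int), l.length ≤ n → refT mn l ≤ (List.count 0 l : Int) := by
  intro n
  induction n with
  | zero =>
    intro l hl
    have : l = [] := List.eq_nil_of_length_eq_zero (Nat.le_zero.mp hl)
    subst this; simp [refT]
  | succ n ih =>
    intro l hl
    cases l with
    | nil => simp [refT]
    | cons x xs =>
      rw [refT]
      set L := leadEq 0 (x :: xs) with hLdef
      have hcnt : List.count 0 (x :: xs) = L + List.count 0 ((x :: xs).drop L) :=
        count_drop_leadEq (x :: xs)
      cases hd : (x :: xs).drop L with
      | nil =>
        have h1 : (x :: xs).drop (L + 1) = [] := by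
          have := congrArg (List.drop 1) hd
          rw [List.drop_drop] at this
          simpa [Nat.add_comm] using this
        rw [h1, refT]
        rw [hd] at hcnt
        simp only [List.count_nil] at hcnt
        split_ifs <;> omega
      | cons y ys =>
        have hy : y ≠ 0 := leadEq_drop_head 0 (x :: xs) y ys hd
        have h1 : (x :: xs).drop (L + 1) = ys := by
          have := congrArg (List.drop 1) hd
          rw [List.drop_drop] at this
          simpa [Nat.add_comm] using this
        rw [h1]
        have hys : refT mn ys ≤ (List.count 0 ys : Int) := by
          apply ih
          have h2 : (y :: ys).length = (x :: xs).length - L := by rw [← hd]; simp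
          simp at h2 hl
          omega
        rw [hd] at hcnt
        have hcy : List.count 0 (y :: ys) = List.count 0 ys := by
          simp [hy]
        rw [hcy] at hcnt
        split_ifs <;> omega

-- ===== VERDICT (by name: the statement is the Claim_ definition above) =====
theorem vacances_spatiales_spec : Claim_equal_vacances_spatiales := by
  intro p d mn cal _dom
  unfold Spec_vacances_spatiales vacances_spatiales vacances_spatiales_alt
  by_cases hp : p < d
  · simp [hp]
  · have hB : sumLongZero mn (List.foldl runStep [] cal) = refT mn cal :=
      sumLongZero_eq_refT mn cal.length cal (le_refl _)
    have hA : pyA1 cal (cal.length : Int) mn (cal.length + 1) 0 0 = refT mn cal := by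
      have := pyA1_eq cal mn (cal.length + 1) 0 0 (by omega)
      simpa using this
    by_cases hc : (PySem.List.count cal 0 : Int) < d
    · rw [if_pos (Or.inr hc), if_neg hp]
      show (0 : Int) = if d ≤ sumLongZero mn (List.foldl runStep [] cal) then 1 else 0
      have hle : refT mn cal ≤ (List.count 0 cal : Int) := refT_le_count mn cal.length cal (le_refl _)
      rw [PySem.List.count_eq] at hc
      rw [hB, if_neg (by omega : ¬ d ≤ refT mn cal)]
    · rw [if_neg (fun h => h.elim hp hc), if_neg hp]
      show (if d ≤ pyA1 cal (cal.length : Int) mn (cal.length + 1) 0 0 then (1 : Int) else 0) =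
        if d ≤ sumLongZero mn (List.foldl runStep [] cal) then 1 else 0
      rw [hA, hB]
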